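-- pv_equiv track=rewrite | github.com/sunabcun/BioinfoStudy | Session2/Week5/2_break_Distance Problem.py | ColorEdges
-- ===== SOURCE A (Python) =====
-- def ChromosomeToCycle(Chromosome):
--     Nodes = []
--     for i in Chromosome:
--         if i > 0:
--             Nodes.append(2*i - 1)
--             Nodes.append(2*i)
--         else:
--             Nodes.append(-2*i)
--             Nodes.append(-2*i - 1)
--
--     return Nodes
--
-- def ColorEdges(P):
--     Edges = []
--     for Chromosome in P:
--         Nodes = ChromosomeToCycle(Chromosome)
--         it = iter(Nodes[1:] + [Nodes[0]])
--         for i in it: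
--             Edges.append((i, next(it)))
--     return Edges
-- ===== SOURCE B (Python) =====
-- def ColorEdges(P):
--     Edges = []
--     for Chromosome in P:
--         g0 = Chromosome[0]
--         first_head = 2*g0 - 1 if g0 > 0 else -2*g0
--         prev_tail = None
--         for g in Chromosome:
--             if prev_tail is not None:
--                 Edges.append((prev_tail, 2*g - 1 if g > 0 else -2*g))
--             prev_tail = 2*g if g > 0 else -2*g - 1
--         Edges.append((prev_tail, first_head))
--     return Edges
-- ===== Notes on version B (the rewrite author's own statement) =====
-- stated objective: alternative
-- what changed: B is a single streaming pass per chromosome carrying only the previous gene's tail node in an accumulator and emitting each edge directly, instead of A's staged build of the doubled node list, its rotation, and manual iter/next pairing.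
import Mathlib
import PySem

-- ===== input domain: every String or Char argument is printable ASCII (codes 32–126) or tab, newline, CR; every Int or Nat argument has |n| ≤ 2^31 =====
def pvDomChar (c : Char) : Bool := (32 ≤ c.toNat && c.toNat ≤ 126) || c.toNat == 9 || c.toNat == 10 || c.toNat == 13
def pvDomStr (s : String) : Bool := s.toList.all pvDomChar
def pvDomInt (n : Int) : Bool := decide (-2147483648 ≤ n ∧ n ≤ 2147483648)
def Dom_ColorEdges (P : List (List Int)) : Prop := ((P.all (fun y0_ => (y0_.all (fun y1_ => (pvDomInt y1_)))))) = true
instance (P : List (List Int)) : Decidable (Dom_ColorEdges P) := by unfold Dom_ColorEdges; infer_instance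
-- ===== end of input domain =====

-- B replaces A's staged build (doubled node list, rotation, iter/next pairing) by a single
-- streaming pass per chromosome that carries only the previous gene's tail node (objective: alternative).

-- ===== PORT A =====
def ChromosomeToCycle (Chromosome : List Int) : List Int :=
  Chromosome.foldl
    (fun Nodes i =>
      if i > 0 then Nodes ++ [2 * i - 1] ++ [2 * i]
      else Nodes ++ [-(2 * i)] ++ [-(2 * i) - 1]) []

-- `for i in it: Edges.append((i, next(it)))` over an even-length list: consume two at a time
def pairNext : List Int → List (Int × Int)
  | a :: b :: rest => (a, b) :: pairNext rest
  | _ => []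

def ColorEdges (P : List (List Int)) : List (Int × Int) :=
  P.foldl
    (fun Edges Chromosome =>
      let Nodes := ChromosomeToCycle Chromosome
      match Nodes with
      | [] => Edges   -- Python raises IndexError here (Nodes[0] on []); excluded by Pre_ColorEdges
      | n0 :: rest => Edges ++ pairNext (rest ++ [n0])) []

-- ===== PORT B =====
def ColorEdges_alt (P : List (List Int)) : List (Int × Int) :=
  P.foldl
    (fun Edges Chromosome =>
      match Chromosome with
      | [] => Edges   -- Python raises IndexError here (Chromosome[0] on []); excluded by Pre_ColorEdges
      | g0 :: _ =>
        let firstHead := if g0 > 0 then 2 * g0 - 1 else -(2 * g0)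
        let st := Chromosome.foldl
          (fun (acc : List (Int × Int) × Option Int) g =>
            let es := match acc.2 with
              | none => acc.1
              | some p => acc.1 ++ [(p, if g > 0 then 2 * g - 1 else -(2 * g))]
            (es, some (if g > 0 then 2 * g else -(2 * g) - 1)))
          (Edges, none)
        match st.2 with
        | some p => st.1 ++ [(p, firstHead)]
        | none => st.1) []

-- ===== PRECONDITION & SPEC =====
-- Pre_ excludes inputs containing an empty chromosome: there Python A raises IndexError (Nodes[0] on []).
def Pre_ColorEdges (P : List (List Int)) : Prop := ∀ c ∈ P, c ≠ []
instance (P : List (List Int)) : Decidable (Pre_ColorEdges P) := by unfold Pre_ColorEdges; infer_instance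
def pvWitness_ColorEdges : List (List Int) := [[1, -2], [3]]

def Spec_ColorEdges (P : List (List Int)) (out : List (Int × Int)) : Prop := out = ColorEdges_alt P
instance (P : List (List Int)) (out : List (Int × Int)) : Decidable (Spec_ColorEdges P out) := by unfold Spec_ColorEdges; infer_instance

-- ===== CLAIM =====
def Claim_equal_ColorEdges : Prop := ∀ (P : List (List Int)), Dom_ColorEdges P → Pre_ColorEdges P → Spec_ColorEdges P (ColorEdges P)

-- ===== LEMMAS AND PROOFS =====

def pvHd (g : Int) : Int := if g > 0 then 2 * g - 1 else -(2 * g)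
def pvTl (g : Int) : Int := if g > 0 then 2 * g else -(2 * g) - 1

lemma ctc_eq (c : List Int) :
    ChromosomeToCycle c = c.flatMap (fun g => [pvHd g, pvTl g]) := by
  unfold ChromosomeToCycle
  have h : ∀ (acc : List Int),
      c.foldl (fun Nodes i =>
        if i > 0 then Nodes ++ [2 * i - 1] ++ [2 * i]
        else Nodes ++ [-(2 * i)] ++ [-(2 * i) - 1]) acc
        = acc ++ c.flatMap (fun g => [pvHd g, pvTl g]) := by
    induction c with
    | nil => simp
    | cons g c ih =>
      intro acc
      simp only [List.foldl_cons, List.flatMap_cons, ih, pvHd, pvTl]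
      split_ifs <;> simp
  simpa using h []

lemma pairNext_chain (c : List Int) (t x : Int) :
    pairNext (t :: c.flatMap (fun g => [pvHd g, pvTl g]) ++ [x])
      = (t :: c.map pvTl).zip (c.map pvHd ++ [x]) := by
  induction c generalizing t with
  | nil => simp [pairNext]
  | cons g c ih =>
    simp only [List.flatMap_cons, List.map_cons, List.cons_append, List.append_assoc,
      List.zip_cons_cons, pairNext]
    simpa using ih (pvTl g)

-- B's inner fold, characterised (state starts at (E, some p))
lemma foldB_some (l : List Int) (E : List (Int × Int)) (p : Int) :
    l.foldl
      (fun (acc : List (Int × Int) × Option Int) g =>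
        (match acc.2 with
          | none => acc.1
          | some q => acc.1 ++ [(q, if g > 0 then 2 * g - 1 else -(2 * g))],
         some (if g > 0 then 2 * g else -(2 * g) - 1)))
      (E, some p)
      = (E ++ (p :: l.map pvTl).zip (l.map pvHd), some ((l.map pvTl).getLastD p)) := by
  induction l generalizing E p with
  | nil => simp
  | cons g l ih =>
    simp only [List.foldl_cons, List.map_cons, List.zip_cons_cons, List.getLastD_cons]
    rw [ih]
    simp [pvHd, pvTl]

lemma zip_snoc (T H : List Int) (t x : Int) (h : T.length = H.length) :
    (t :: T).zip (H ++ [x]) = (t :: T).zip H ++ [((T.getLastD t), x)] := by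
  induction T generalizing H t with
  | nil =>
    have : H = [] := List.length_eq_zero_iff.mp h.symm
    simp [this]
  | cons a T ih =>
    cases H with
    | nil => simp at h
    | cons b H =>
      simp only [List.cons_append, List.zip_cons_cons, List.getLastD_cons]
      rw [ih H a (by simpa using h)]

lemma step_eq (Edges : List (Int × Int)) (c : List Int) :
    (let Nodes := ChromosomeToCycle c
     match Nodes with
     | [] => Edges
     | n0 :: rest => Edges ++ pairNext (rest ++ [n0]))
    = (match c with
       | [] => Edges
       | g0 :: _ =>
         let firstHead := if g0 > 0 then 2 * g0 - 1 else -(2 * g0)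
         let st := c.foldl
           (fun (acc : List (Int × Int) × Option Int) g =>
             let es := match acc.2 with
               | none => acc.1
               | some p => acc.1 ++ [(p, if g > 0 then 2 * g - 1 else -(2 * g))]
             (es, some (if g > 0 then 2 * g else -(2 * g) - 1)))
           (Edges, none)
         match st.2 with
         | some p => st.1 ++ [(p, firstHead)]
         | none => st.1) := by
  cases c with
  | nil => simp [ChromosomeToCycle]
  | cons g0 c' =>
    simp only [ctc_eq, List.flatMap_cons, List.cons_append, List.foldl_cons, List.nil_append]
    rw [show (if g0 > 0 then 2 * g0 else -(2 * g0) - 1) = pvTl g0 from rfl, foldB_some]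
    have hlen : (c'.map pvTl).length = (c'.map pvHd).length := by simp
    rw [show (pvTl g0 :: (List.flatMap (fun g => [pvHd g, pvTl g]) c' ++ [pvHd g0]))
          = pvTl g0 :: List.flatMap (fun g => [pvHd g, pvTl g]) c' ++ [pvHd g0] from rfl,
       pairNext_chain, zip_snoc (c'.map pvTl) (c'.map pvHd) (pvTl g0) (pvHd g0) hlen]
    simp [pvHd]

-- ===== VERDICT =====
theorem ColorEdges_spec : Claim_equal_ColorEdges := by
  intro P _ hpre
  unfold Spec_ColorEdges ColorEdges ColorEdges_alt
  exact PySem.List.foldl_congr_mem P _ _ [] (fun acc c _ => step_eq acc c)
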